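-- pv_equiv track=rewrite | github.com/yanisa2s/yanis | spell_corrector.py | get_suggestions_levenshtein
-- ===== SOURCE A (Python) =====
-- def levenshtein_distance(s1: str, s2: str) -> int:
--     """
--     Calcule la distance d'édition (Levenshtein) entre deux chaînes.
--     Implémentation sans bibliothèque externe.
--
--     Args:
--         s1: Première chaîne
--         s2: Deuxième chaîne
--
--     Returns:
--         Distance d'édition minimale (int)
--     """
--     len1, len2 = len(s1), len(s2)
--
--     # Cas de base
--     if len1 == 0:
--         return len2
--     if len2 == 0:
--         return len1
--
--     # Matrice de programmation dynamique
--     # On utilise deux rangées seulement pour économiser la mémoire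
--     prev = list(range(len2 + 1))
--     curr = [0] * (len2 + 1)
--
--     for i in range(1, len1 + 1):
--         curr[0] = i
--         for j in range(1, len2 + 1):
--             if s1[i - 1] == s2[j - 1]:
--                 cost = 0
--             else:
--                 cost = 1
--             curr[j] = min(
--                 prev[j] + 1,       # suppression
--                 curr[j - 1] + 1,   # insertion
--                 prev[j - 1] + cost # substitution
--             )
--         prev, curr = curr, prev
--
--     return prev[len2]
--
-- def get_suggestions_levenshtein(word: str, dictionary: set[str], max_suggestions: int = 5) -> list[str]:
--     """
--     Propose des corrections par distance de Levenshtein.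
--
--     Args:
--         word: Mot inconnu à corriger
--         dictionary: Ensemble des mots valides
--         max_suggestions: Nombre maximum de suggestions
--
--     Returns:
--         Liste triée des meilleures suggestions (distance croissante)
--     """
--     word_lower = word.lower()
--     scored = []
--
--     for dict_word in dictionary:
--         dist = levenshtein_distance(word_lower, dict_word)
--         scored.append((dist, dict_word))
--
--     scored.sort(key=lambda x: (x[0], x[1]))
--     return [w for _, w in scored[:max_suggestions]]
-- ===== SOURCE B (Python) =====
-- def _lev(a, b):
--     """Edit distance by demand-driven memoized recursion over prefix lengths (i, j),
--     run with an explicit work stack so it is depth-safe: a cell is computed only once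
--     all three sub-cells it depends on are already memoized, otherwise it is re-pushed
--     below its missing sub-cells."""
--     memo = {}
--     stack = [(len(a), len(b))]
--     while stack:
--         c = stack.pop()
--         if c in memo:
--             continue
--         i, j = c
--         if i == 0:
--             memo[c] = j
--         elif j == 0:
--             memo[c] = i
--         else:
--             deps = [(i - 1, j), (i, j - 1), (i - 1, j - 1)]
--             if all(d in memo for d in deps):
--                 cost = int(a[i - 1] != b[j - 1])
--                 memo[c] = min(memo[deps[0]] + 1, memo[deps[1]] + 1, memo[deps[2]] + cost)
--             else:
--                 stack.append(c)
--                 for d in deps: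
--                     if d not in memo:
--                         stack.append(d)
--     return memo[(len(a), len(b))]
--
--
-- def get_suggestions_levenshtein(word, dictionary, max_suggestions=5):
--     word_lower = word.lower()
--     scored = sorted((_lev(word_lower, w), w) for w in dictionary)
--     return [w for _, w in scored[:max_suggestions]]
-- ===== Notes on version B (the rewrite author's own statement) =====
-- stated objective: alternative
-- what changed: The edit distance is computed demand-driven by memoized top-down recursion over prefix-length pairs (i,j), driven by an explicit work stack with a dict cache (a cell is computed only when its three sub-cells are memoized, otherwise re-pushed below its missing sub-cells), instead of A's bottom-up two-row DP table; the wrapper builds and sorts the scored list in one sorted() expression instead of an explicit loop plus in-place sort.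
import Mathlib
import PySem

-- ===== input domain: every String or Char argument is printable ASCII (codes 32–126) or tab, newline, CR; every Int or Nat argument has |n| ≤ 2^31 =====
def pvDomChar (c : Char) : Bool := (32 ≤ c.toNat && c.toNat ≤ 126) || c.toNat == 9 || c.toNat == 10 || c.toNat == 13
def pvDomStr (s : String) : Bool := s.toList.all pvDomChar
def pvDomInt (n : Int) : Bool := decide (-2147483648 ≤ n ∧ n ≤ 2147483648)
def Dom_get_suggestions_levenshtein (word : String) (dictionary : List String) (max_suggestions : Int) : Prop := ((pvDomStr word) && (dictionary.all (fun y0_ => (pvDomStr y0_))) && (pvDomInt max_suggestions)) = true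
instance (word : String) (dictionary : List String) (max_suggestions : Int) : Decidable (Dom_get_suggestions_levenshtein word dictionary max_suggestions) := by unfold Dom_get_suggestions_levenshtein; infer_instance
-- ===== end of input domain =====

-- B computes each edit distance demand-driven: memoized top-down recursion over prefix
-- lengths (i, j), run with an explicit work stack and a dict cache, instead of A's
-- bottom-up two-row DP (objective: alternative decomposition, same asymptotic cost).

-- ===== PORT A =====
-- port of levenshtein_distance: two-row iterative DP, rows swapped after each outer step
def levenshtein_distance (s1 s2 : String) : Int :=
  let c1 := s1.toList
  let c2 := s2.toList
  let len1 := c1.length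
  let len2 := c2.length
  if len1 = 0 then (len2 : Int)
  else if len2 = 0 then (len1 : Int)
  else
    let prev : List Int := (List.range (len2 + 1)).map (fun n : Nat => (n : Int))
    let curr : List Int := List.replicate (len2 + 1) 0
    let final := (List.range' 1 len1).foldl (fun (pc : List Int × List Int) (i : Nat) =>
      let curr1 := pc.2.set 0 (i : Int)
      let curr2 := (List.range' 1 len2).foldl (fun (cu : List Int) (j : Nat) =>
        let cost : Int := if c1.getD (i - 1) ' ' = c2.getD (j - 1) ' ' then 0 else 1
        cu.set j (min (min (pc.1.getD j 0 + 1) (cu.getD (j - 1) 0 + 1))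
          (pc.1.getD (j - 1) 0 + cost))) curr1
      (curr2, pc.1)) (prev, curr)
    final.1.getD len2 0

def get_suggestions_levenshtein (word : String) (dictionary : List String) (max_suggestions : Int) : List String :=
  let word_lower := PySem.Str.lower word
  let scored := dictionary.foldl
    (fun acc dict_word => acc ++ [(levenshtein_distance word_lower dict_word, dict_word)]) []
  let sorted := PySem.List.sorted2 scored (fun x => x.1) (fun x => x.2)
  (PySem.List.slice sorted none (some max_suggestions)).map (fun p => p.2)

-- ===== PORT B =====
-- port of Source B's _lev while-loop: stack of cells (i, j); a cell is memoized from its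
-- three sub-cells once they are all in the cache, else re-pushed below the missing ones.
-- The Python 'while stack:' loop is run on fuel 4^(m+n+1), proved sufficient below
-- (lemma pvOne); memo[d] on a guarded-present key is modelled by getD _ 0, exact there.
def lev_stack_loop (ca cb : List Char) :
    Nat → List (Nat × Nat) → PySem.Dict (Nat × Nat) Int → PySem.Dict (Nat × Nat) Int
  | 0, _, memo => memo
  | _ + 1, [], memo => memo
  | fuel + 1, (i, j) :: rest, memo =>
    if memo.contains (i, j) then lev_stack_loop ca cb fuel rest memo
    else if i = 0 then lev_stack_loop ca cb fuel rest (memo.insert (i, j) (j : Int))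
    else if j = 0 then lev_stack_loop ca cb fuel rest (memo.insert (i, j) (i : Int))
    else
      let deps := [(i - 1, j), (i, j - 1), (i - 1, j - 1)]
      if deps.all (fun d => memo.contains d) then
        let cost : Int := if ca.getD (i - 1) ' ' ≠ cb.getD (j - 1) ' ' then 1 else 0
        lev_stack_loop ca cb fuel rest
          (memo.insert (i, j) (min (min (memo.getD (i - 1, j) 0 + 1) (memo.getD (i, j - 1) 0 + 1))
            (memo.getD (i - 1, j - 1) 0 + cost)))
      else
        lev_stack_loop ca cb fuel
          ((deps.filter (fun d => !memo.contains d)).reverse ++ (i, j) :: rest) memo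

def lev_memo (a b : String) : Int :=
  let ca := a.toList
  let cb := b.toList
  let memo := lev_stack_loop ca cb (4 ^ (ca.length + cb.length + 1))
    [(ca.length, cb.length)] PySem.Dict.empty
  -- final 'return memo[(len(a), len(b))]': the key is always present (lemma pvOne)
  memo.getD (ca.length, cb.length) 0

def get_suggestions_levenshtein_alt (word : String) (dictionary : List String) (max_suggestions : Int) : List String :=
  let word_lower := PySem.Str.lower word
  let scored := PySem.List.sorted2
    (dictionary.map (fun w => (lev_memo word_lower w, w)))
    (fun x => x.1) (fun x => x.2)
  (PySem.List.slice scored none (some max_suggestions)).map (fun p => p.2)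

-- ===== PRECONDITION & SPEC =====
def Spec_get_suggestions_levenshtein (word : String) (dictionary : List String) (max_suggestions : Int) (out : List String) : Prop := out = get_suggestions_levenshtein_alt word dictionary max_suggestions
instance (word : String) (dictionary : List String) (max_suggestions : Int) (out : List String) : Decidable (Spec_get_suggestions_levenshtein word dictionary max_suggestions out) := by unfold Spec_get_suggestions_levenshtein; infer_instance

-- ===== CLAIM (what is proved, stated in full; the proofs are below) =====
def Claim_equal_get_suggestions_levenshtein : Prop := ∀ (word : String) (dictionary : List String) (max_suggestions : Int), Dom_get_suggestions_levenshtein word dictionary max_suggestions → Spec_get_suggestions_levenshtein word dictionary max_suggestions (get_suggestions_levenshtein word dictionary max_suggestions)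

-- ===== LEMMAS AND PROOFS =====

-- the mathematical recurrence both ports compute: edit distance of the length-i and length-j prefixes
def pvL (c1 c2 : List Char) (i j : Nat) : Int :=
  match i, j with
  | 0, j => (j : Int)
  | i+1, 0 => ((i : Int) + 1)
  | i+1, j+1 =>
    min (min (pvL c1 c2 i (j+1) + 1) (pvL c1 c2 (i+1) j + 1))
      (pvL c1 c2 i j + if c1.getD i ' ' = c2.getD j ' ' then 0 else 1)
termination_by i + j

lemma pvL_zero_right (c1 c2 : List Char) (i : Nat) : pvL c1 c2 i 0 = (i : Int) := by
  cases i <;> simp [pvL]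

-- ===== B-side: the stack loop memoizes correct values =====

-- every cached value is the recurrence value of its cell
def pvCorrect (ca cb : List Char) (memo : PySem.Dict (Nat × Nat) Int) : Prop :=
  ∀ p v, memo.get? p = some v → v = pvL ca cb p.1 p.2

lemma pvCorrect_empty (ca cb : List Char) : pvCorrect ca cb PySem.Dict.empty := by
  intro p v h
  simp [PySem.Dict.get?_empty] at h

lemma pvCorrect_insert (ca cb : List Char) (memo : PySem.Dict (Nat × Nat) Int)
    (h : pvCorrect ca cb memo) (c : Nat × Nat) (v : Int) (hv : v = pvL ca cb c.1 c.2) :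
    pvCorrect ca cb (memo.insert c v) := by
  intro p w hw
  rw [PySem.Dict.get?_insert] at hw
  split at hw
  · rename_i hpc
    cases hw
    subst hpc
    exact hv
  · exact h p w hw

lemma pvContains_insert (memo : PySem.Dict (Nat × Nat) Int) (c p : Nat × Nat) (v : Int)
    (h : memo.contains p = true) : (memo.insert c v).contains p = true := by
  rw [PySem.Dict.contains_insert]
  simp [h]

lemma pvGetD_of_contains (ca cb : List Char) (memo : PySem.Dict (Nat × Nat) Int)
    (hc : pvCorrect ca cb memo) (p : Nat × Nat) (h : memo.contains p = true) :
    memo.getD p 0 = pvL ca cb p.1 p.2 := by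
  rw [PySem.Dict.contains_eq_isSome_get?] at h
  obtain ⟨v, hv⟩ := Option.isSome_iff_exists.mp h
  rw [PySem.Dict.getD_eq_get?_getD, hv]
  exact hc p v hv

-- an empty stack returns the cache unchanged, any fuel
lemma pvLoop_nil (ca cb : List Char) (fuel : Nat) (memo : PySem.Dict (Nat × Nat) Int) :
    lev_stack_loop ca cb fuel [] memo = memo := by
  cases fuel <;> rfl

-- statement of the one-cell invariant at weight level s (used for the strong induction)
def pvOneStmt (ca cb : List Char) (s : Nat) : Prop :=
  ∀ i j : Nat, i + j ≤ s →
    ∀ (memo : PySem.Dict (Nat × Nat) Int) (rest : List (Nat × Nat)) (fuel : Nat),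
      pvCorrect ca cb memo → 4 ^ (s + 1) ≤ fuel →
    ∃ (memo' : PySem.Dict (Nat × Nat) Int) (k : Nat),
      1 ≤ k ∧ k ≤ 4 ^ (s + 1) ∧
      lev_stack_loop ca cb fuel ((i, j) :: rest) memo
        = lev_stack_loop ca cb (fuel - k) rest memo' ∧
      pvCorrect ca cb memo' ∧ memo'.contains (i, j) = true ∧
      (∀ p, memo.contains p = true → memo'.contains p = true)

-- processing a LIST of cells of weight ≤ s, sequentially, given the one-cell invariant
lemma pvMany (ca cb : List Char) (s : Nat) (hone : pvOneStmt ca cb s) :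
    ∀ (L : List (Nat × Nat)), (∀ c ∈ L, c.1 + c.2 ≤ s) →
    ∀ (memo : PySem.Dict (Nat × Nat) Int) (rest : List (Nat × Nat)) (fuel : Nat),
      pvCorrect ca cb memo → L.length * 4 ^ (s + 1) ≤ fuel →
    ∃ (memo' : PySem.Dict (Nat × Nat) Int) (k : Nat),
      k ≤ L.length * 4 ^ (s + 1) ∧
      lev_stack_loop ca cb fuel (L ++ rest) memo
        = lev_stack_loop ca cb (fuel - k) rest memo' ∧
      pvCorrect ca cb memo' ∧ (∀ c ∈ L, memo'.contains c = true) ∧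
      (∀ p, memo.contains p = true → memo'.contains p = true) := by
  intro L
  induction L with
  | nil =>
      intro _ memo rest fuel hc _
      exact ⟨memo, 0, by omega, by simp, hc, by simp, fun _ h => h⟩
  | cons c L' ih =>
      intro hsum memo rest fuel hc hfuel
      obtain ⟨ci, cj⟩ := c
      have hexp : ((ci, cj) :: L').length * 4 ^ (s + 1)
          = L'.length * 4 ^ (s + 1) + 4 ^ (s + 1) := by
        simp [List.length_cons]; ring
      have h1 := hone ci cj (hsum (ci, cj) (by simp)) memo (L' ++ rest) fuel hc (by omega)
      obtain ⟨memo1, k1, hk11, hk12, heq1, hc1, hcon1, hmono1⟩ := h1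
      have h2 := ih (fun c hc' => hsum c (by simp [hc'])) memo1 rest (fuel - k1) hc1
        (by omega)
      obtain ⟨memo2, k2, hk2, heq2, hc2, hcon2, hmono2⟩ := h2
      refine ⟨memo2, k1 + k2, ?_, ?_, hc2, ?_, fun p hp => hmono2 p (hmono1 p hp)⟩
      · omega
      · rw [List.cons_append, heq1, heq2]
        congr 1
        omega
      · intro c hcmem
        rcases List.mem_cons.mp hcmem with h | h
        · subst h
          exact hmono2 _ hcon1
        · exact hcon2 c h

-- the key invariant: processing one cell of weight ≤ s consumes at most 4^(s+1) fuel and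
-- leaves a correct cache that contains the cell (strong induction on s)
lemma pvOne (ca cb : List Char) : ∀ s : Nat, pvOneStmt ca cb s := by
  intro s
  induction s using Nat.strong_induction_on with
  | _ s IH =>
  intro i j hij memo rest fuel hc hfuel
  have hpow1 : 0 < 4 ^ (s + 1) := Nat.pow_pos (by norm_num)
  obtain ⟨f, rfl⟩ : ∃ f, fuel = f + 1 := ⟨fuel - 1, by omega⟩
  by_cases hmem : memo.contains (i, j) = true
  · -- cache hit: skip
    refine ⟨memo, 1, le_refl 1, by omega, ?_, hc, hmem, fun _ h => h⟩
    simp only [lev_stack_loop, hmem, if_true, Nat.add_sub_cancel]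
  · by_cases hi : i = 0
    · -- base row
      subst hi
      refine ⟨memo.insert (0, j) (j : Int), 1, le_refl 1, by omega, ?_, ?_, ?_, ?_⟩
      · simp [lev_stack_loop, hmem]
      · exact pvCorrect_insert ca cb memo hc (0, j) _ (by simp [pvL])
      · exact PySem.Dict.contains_insert_self _ _ _
      · exact fun p hp => pvContains_insert memo _ p _ hp
    · by_cases hj : j = 0
      · -- base column
        subst hj
        refine ⟨memo.insert (i, 0) (i : Int), 1, le_refl 1, by omega, ?_, ?_, ?_, ?_⟩
        · simp [lev_stack_loop, hmem, hi]
        · exact pvCorrect_insert ca cb memo hc (i, 0) _ (by simp [pvL_zero_right])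
        · exact PySem.Dict.contains_insert_self _ _ _
        · exact fun p hp => pvContains_insert memo _ p _ hp
      · -- interior cell
        obtain ⟨i', rfl⟩ : ∃ i', i = i' + 1 := ⟨i - 1, by omega⟩
        obtain ⟨j', rfl⟩ : ∃ j', j = j' + 1 := ⟨j - 1, by omega⟩
        have hs2 : 2 ≤ s := by omega
        have hval : ∀ (m : PySem.Dict (Nat × Nat) Int), pvCorrect ca cb m →
            m.contains (i', j' + 1) = true → m.contains (i' + 1, j') = true →
            m.contains (i', j') = true →
            (min (min (m.getD (i' + 1 - 1, j' + 1) 0 + 1) (m.getD (i' + 1, j' + 1 - 1) 0 + 1))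
              (m.getD (i' + 1 - 1, j' + 1 - 1) 0
                + if ca.getD (i' + 1 - 1) ' ' ≠ cb.getD (j' + 1 - 1) ' ' then 1 else 0))
              = pvL ca cb (i' + 1) (j' + 1) := by
          intro m hcm h1 h2 h3
          have e1 := pvGetD_of_contains ca cb m hcm _ h1
          have e2 := pvGetD_of_contains ca cb m hcm _ h2
          have e3 := pvGetD_of_contains ca cb m hcm _ h3
          simp only [Nat.add_sub_cancel] at *
          rw [e1, e2, e3]
          conv_rhs => rw [pvL]
          congr 1
          congr 1
          by_cases hch : ca.getD i' ' ' = cb.getD j' ' '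
          · rw [if_neg (not_not_intro hch), if_pos hch]
          · rw [if_pos hch, if_neg hch]
        by_cases hall : ([( i', j' + 1), (i' + 1, j'), (i', j')] : List (Nat × Nat)).all
            (fun d => memo.contains d) = true
        · -- all three sub-cells cached: compute now
          simp only [List.all_cons, List.all_nil, Bool.and_true, Bool.and_eq_true] at hall
          obtain ⟨h1, h2, h3⟩ := hall
          have hall1 : (([(i', j' + 1), (i' + 1, j'), (i', j')] : List (Nat × Nat)).all
              (fun d => memo.contains d)) = true := by
            simp only [List.all_cons, List.all_nil, Bool.and_true, Bool.and_eq_true]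
            exact ⟨h1, h2, h3⟩
          refine ⟨memo.insert (i' + 1, j' + 1)
              (min (min (memo.getD (i' + 1 - 1, j' + 1) 0 + 1)
                  (memo.getD (i' + 1, j' + 1 - 1) 0 + 1))
                (memo.getD (i' + 1 - 1, j' + 1 - 1) 0
                  + if ca.getD (i' + 1 - 1) ' ' ≠ cb.getD (j' + 1 - 1) ' ' then 1 else 0)),
            1, le_refl 1, by omega, ?_, ?_, ?_, ?_⟩
          · simp only [lev_stack_loop, hmem, hall1, hi, hj, if_false, if_true,
              Bool.false_eq_true, Nat.add_sub_cancel]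
          · exact pvCorrect_insert ca cb memo hc _ _ (hval memo hc h1 h2 h3)
          · exact PySem.Dict.contains_insert_self _ _ _
          · exact fun p hp => pvContains_insert memo _ p _ hp
        · -- some sub-cell missing: push the missing ones above this cell and retry
          have hstep : lev_stack_loop ca cb (f + 1) ((i' + 1, j' + 1) :: rest) memo
              = lev_stack_loop ca cb f
                ((([( i', j' + 1), (i' + 1, j'), (i', j')] : List (Nat × Nat)).filter
                    (fun d => !memo.contains d)).reverse ++ (i' + 1, j' + 1) :: rest) memo := by
            simp only [lev_stack_loop, hmem, hall, hi, hj, if_false,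
              Bool.false_eq_true, Nat.add_sub_cancel]
          set deps : List (Nat × Nat) := [(i', j' + 1), (i' + 1, j'), (i', j')] with hdeps
          set L : List (Nat × Nat) := (deps.filter (fun d => !memo.contains d)).reverse with hL
          have hLsub : ∀ c ∈ L, c ∈ deps := by
            intro c hcL
            rw [hL, List.mem_reverse] at hcL
            exact List.mem_of_mem_filter hcL
          have hLsum : ∀ c ∈ L, c.1 + c.2 ≤ s - 1 := by
            intro c hcL
            have := hLsub c hcL
            rw [hdeps] at this
            simp only [List.mem_cons, List.not_mem_nil, or_false] at this
            rcases this with h | h | h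
            · subst h
              have hx : i' + (j' + 1) ≤ s - 1 := by omega
              simpa using hx
            · subst h
              have hx : (i' + 1) + j' ≤ s - 1 := by omega
              simpa using hx
            · subst h
              have hx : i' + j' ≤ s - 1 := by omega
              simpa using hx
          have hLlen : L.length ≤ 3 := by
            rw [hL, List.length_reverse]
            calc (deps.filter _).length ≤ deps.length := List.length_filter_le _ _
              _ = 3 := by rw [hdeps]; rfl
          have hQ : 4 ^ ((s - 1) + 1) = 4 ^ s := by congr 1; omega
          have hpow4 : 4 ^ (s + 1) = 4 * 4 ^ s := by rw [pow_succ]; ring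
          have hpowS : 16 ≤ 4 ^ s := by
            calc (16 : Nat) = 4 ^ 2 := by norm_num
              _ ≤ 4 ^ s := Nat.pow_le_pow_right (by norm_num) hs2
          have hLf : L.length * 4 ^ ((s - 1) + 1) ≤ f := by
            rw [hQ]
            have : L.length * 4 ^ s ≤ 3 * 4 ^ s := Nat.mul_le_mul_right _ hLlen
            omega
          have hmany := pvMany ca cb (s - 1) (IH (s - 1) (by omega)) L hLsum memo
            ((i' + 1, j' + 1) :: rest) f hc hLf
          obtain ⟨memo2, kL, hkL, heqL, hc2, hconL, hmono2⟩ := hmany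
          rw [hQ] at hkL
          have hkL3 : kL ≤ 3 * 4 ^ s := le_trans hkL (Nat.mul_le_mul_right _ hLlen)
          -- every sub-cell is now cached
          have hdepin : ∀ c ∈ deps, memo2.contains c = true := by
            intro c hcd
            by_cases hcm : memo.contains c = true
            · exact hmono2 c hcm
            · refine hconL c ?_
              rw [hL, List.mem_reverse, List.mem_filter]
              exact ⟨hcd, by simp [hcm]⟩
          have h1 := hdepin (i', j' + 1) (by rw [hdeps]; simp)
          have h2 := hdepin (i' + 1, j') (by rw [hdeps]; simp)
          have h3 := hdepin (i', j') (by rw [hdeps]; simp)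
          obtain ⟨f2, hf2⟩ : ∃ f2, f - kL = f2 + 1 := ⟨f - kL - 1, by omega⟩
          by_cases hmem2 : memo2.contains (i' + 1, j' + 1) = true
          · -- the cell itself got cached meanwhile: skip step
            refine ⟨memo2, kL + 2, by omega, by omega, ?_, hc2, hmem2, hmono2⟩
            rw [hstep, heqL, hf2]
            simp only [lev_stack_loop, hmem2, if_true]
            congr 1
            omega
          · -- compute step from the now-cached sub-cells
            refine ⟨memo2.insert (i' + 1, j' + 1)
                (min (min (memo2.getD (i' + 1 - 1, j' + 1) 0 + 1)
                    (memo2.getD (i' + 1, j' + 1 - 1) 0 + 1))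
                  (memo2.getD (i' + 1 - 1, j' + 1 - 1) 0
                    + if ca.getD (i' + 1 - 1) ' ' ≠ cb.getD (j' + 1 - 1) ' ' then 1 else 0)),
              kL + 2, by omega, by omega, ?_, ?_, ?_, ?_⟩
            · have hall2 : (([(i', j' + 1), (i' + 1, j'), (i', j')] : List (Nat × Nat)).all
                  (fun d => memo2.contains d)) = true := by
                simp only [List.all_cons, List.all_nil, Bool.and_true, Bool.and_eq_true]
                exact ⟨h1, h2, h3⟩
              rw [hstep, heqL, hf2]
              simp only [lev_stack_loop, hmem2, hall2, hi, hj, if_false, if_true,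
                Bool.false_eq_true, Nat.add_sub_cancel]
              congr 1
              omega
            · exact pvCorrect_insert ca cb memo2 hc2 _ _ (hval memo2 hc2 h1 h2 h3)
            · exact PySem.Dict.contains_insert_self _ _ _
            · exact fun p hp => pvContains_insert memo2 _ p _ (hmono2 p hp)

-- B's distance equals the recurrence
lemma lev_memo_eq_pvL (a b : String) :
    lev_memo a b = pvL a.toList b.toList a.toList.length b.toList.length := by
  have h := pvOne a.toList b.toList (a.toList.length + b.toList.length)
    a.toList.length b.toList.length (le_refl _) PySem.Dict.empty []
    (4 ^ (a.toList.length + b.toList.length + 1))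
    (pvCorrect_empty _ _) (le_refl _)
  obtain ⟨memo', k, _, _, heq, hc', hcon, _⟩ := h
  simp only [lev_memo]
  rw [heq, pvLoop_nil]
  exact pvGetD_of_contains a.toList b.toList memo' hc' _ hcon

-- ===== A-side loop invariants =====

lemma pvInner (c1 c2 : List Char) (i : Nat) (prev : List Int)
    (hprev : ∀ j, j ≤ c2.length → prev.getD j 0 = pvL c1 c2 i j) :
    ∀ (r t : Nat) (cu : List Int), t + r = c2.length →
    (hlen : cu.length = c2.length + 1) →
    (hcu : ∀ j, j ≤ t → cu.getD j 0 = pvL c1 c2 (i+1) j) →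
    let res := (List.range' (t+1) r).foldl (fun cu j =>
        let cost : Int := if c1.getD (i + 1 - 1) ' ' = c2.getD (j - 1) ' ' then 0 else 1
        cu.set j (min (min (prev.getD j 0 + 1) (cu.getD (j - 1) 0 + 1))
          (prev.getD (j - 1) 0 + cost))) cu
    res.length = c2.length + 1 ∧ ∀ j, j ≤ c2.length → res.getD j 0 = pvL c1 c2 (i+1) j := by
  intro r
  induction r with
  | zero =>
      intro t cu ht hlen hcu
      have hte : t = c2.length := by omega
      subst hte
      exact ⟨hlen, by simpa using hcu⟩
  | succ r ih =>
      intro t cu ht hlen hcu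
      have hrange : List.range' (t+1) (r+1) = (t+1) :: List.range' (t+2) r := by
        simp [List.range'_succ]
      simp only [hrange, List.foldl_cons]
      have htlt : t + 1 < cu.length := by omega
      set v : Int := min (min (prev.getD (t+1) 0 + 1) (cu.getD (t+1-1) 0 + 1))
          (prev.getD (t+1-1) 0 + if c1.getD (i+1-1) ' ' = c2.getD (t+1-1) ' ' then 0 else 1) with hv
      have hvL : v = pvL c1 c2 (i+1) (t+1) := by
        rw [hv]
        have e1 : prev.getD (t+1) 0 = pvL c1 c2 i (t+1) := hprev _ (by omega)
        have e2 : cu.getD (t+1-1) 0 = pvL c1 c2 (i+1) t := by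
          simpa using hcu t (le_refl t)
        have e3 : prev.getD (t+1-1) 0 = pvL c1 c2 i t := by
          simpa using hprev t (by omega)
        rw [e1, e2, e3]
        rw [pvL]
        simp
      have := ih (t+1) (cu.set (t+1) v) (by omega) (by simpa using hlen) ?_
      · simpa [hv] using this
      · intro j hj
        rcases Nat.lt_or_ge j (t+1) with hjlt | hjge
        · have : (cu.set (t+1) v).getD j 0 = cu.getD j 0 := by
            simp [List.getD_eq_getElem?_getD, List.getElem?_set_ne (by omega : t+1 ≠ j)]
          rw [this]
          exact hcu j (by omega)
        · have hje : j = t+1 := by omega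
          rw [hje]
          have hset : (cu.set (t+1) v).getD (t+1) 0 = v := by
            simp [List.getD_eq_getElem?_getD, List.getElem?_set_self htlt]
          rw [hset]
          exact hvL

lemma pvOuter (c1 c2 : List Char) :
    ∀ (r t : Nat) (prev cu : List Int),
    prev.length = c2.length + 1 → cu.length = c2.length + 1 →
    (∀ j, j ≤ c2.length → prev.getD j 0 = pvL c1 c2 t j) →
    let final := (List.range' (t+1) r).foldl (fun (pc : List Int × List Int) (i : Nat) =>
      let curr1 := pc.2.set 0 (i : Int)
      let curr2 := (List.range' 1 c2.length).foldl (fun (cu : List Int) (j : Nat) =>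
        let cost : Int := if c1.getD (i - 1) ' ' = c2.getD (j - 1) ' ' then 0 else 1
        cu.set j (min (min (pc.1.getD j 0 + 1) (cu.getD (j - 1) 0 + 1))
          (pc.1.getD (j - 1) 0 + cost))) curr1
      (curr2, pc.1)) (prev, cu)
    final.1.length = c2.length + 1 ∧ final.2.length = c2.length + 1 ∧
      ∀ j, j ≤ c2.length → final.1.getD j 0 = pvL c1 c2 (t+r) j := by
  intro r
  induction r with
  | zero =>
      intro t prev cu hp hc hrow
      exact ⟨hp, hc, by simpa using hrow⟩
  | succ r ih =>
      intro t prev cu hp hc hrow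
      have hrange : List.range' (t+1) (r+1) = (t+1) :: List.range' (t+2) r := by
        simp [List.range'_succ]
      simp only [hrange, List.foldl_cons]
      have hc1len : (cu.set 0 ((t+1 : Nat) : Int)).length = c2.length + 1 := by
        simpa using hc
      have hc1 : ∀ j, j ≤ 0 → (cu.set 0 ((t+1 : Nat) : Int)).getD j 0 = pvL c1 c2 (t+1) j := by
        intro j hj
        have hje : j = 0 := by omega
        subst hje
        have h0 : (cu.set 0 ((t+1 : Nat) : Int)).getD 0 0 = ((t+1 : Nat) : Int) := by
          simp [List.getD_eq_getElem?_getD, List.getElem?_set_self (by omega : 0 < cu.length)]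
        rw [h0, pvL_zero_right]
      have hin := pvInner c1 c2 t prev hrow c2.length 0 (cu.set 0 ((t+1 : Nat) : Int))
        (by omega) hc1len hc1
      simp only [Nat.zero_add] at hin
      obtain ⟨hlen2, hrow2⟩ := hin
      have hfin := ih (t+1) _ prev hlen2 hp hrow2
      have he : t + 1 + r = t + (r + 1) := by omega
      rw [he] at hfin
      exact hfin

lemma levenshtein_distance_eq_pvL (s1 s2 : String) :
    levenshtein_distance s1 s2 = pvL s1.toList s2.toList s1.toList.length s2.toList.length := by
  by_cases h1 : s1.toList.length = 0
  · simp [levenshtein_distance, h1, pvL]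
  · by_cases h2 : s2.toList.length = 0
    · simp only [levenshtein_distance]
      rw [if_neg h1, if_pos h2, h2, pvL_zero_right]
    · simp only [levenshtein_distance]
      rw [if_neg h1, if_neg h2]
      have hprev : ∀ j, j ≤ s2.toList.length →
          ((List.range (s2.toList.length + 1)).map (fun n : Nat => (n : Int))).getD j 0
            = pvL s1.toList s2.toList 0 j := by
        intro j hj
        have hlt : j < s2.toList.length + 1 := by omega
        rw [PySem.List.getD_map_range _ _ _ _ hlt, pvL]
      have hout := pvOuter s1.toList s2.toList s1.toList.length 0
        ((List.range (s2.toList.length + 1)).map (fun n : Nat => (n : Int)))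
        (List.replicate (s2.toList.length + 1) 0)
        (by simp) (by simp) hprev
      simp only [Nat.zero_add] at hout
      exact hout.2.2 _ (le_refl _)

lemma dist_eq (wl w : String) : levenshtein_distance wl w = lev_memo wl w := by
  rw [levenshtein_distance_eq_pvL, lev_memo_eq_pvL]

-- ===== VERDICT (by name: the statement is the Claim_ definition above) =====
theorem get_suggestions_levenshtein_spec : Claim_equal_get_suggestions_levenshtein := by
  intro word dictionary max_suggestions _
  unfold Spec_get_suggestions_levenshtein get_suggestions_levenshtein get_suggestions_levenshtein_alt
  simp only [PySem.List.foldl_append_singleton_eq_map, List.nil_append, dist_eq]
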